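-- pv_equiv track=rewrite | github.com/kelsey-b-schmidt/SOFTWARE-ENGINEERING-I-Portfolio-Project | backend/board_maker_2.py | prune_choices
-- ===== SOURCE A (Python) =====
-- def remove_num(choices, num):
--     try:
--         choices.remove(num)
--     except:
--         pass
--
-- def prune_choices(board, choices, row, column):
--     # along same column from top to current position
--     for i in range(0, row):
--         remove_num(choices, board[i][column])
--
--     # along same row from right to current position
--     for i in range(0, column):
--         remove_num(choices, board[row][i])
--
--     # 2nd row of blocks
--     # 1st column
--     if column % 3 == 0 and (row + 2) % 3 == 0:
--         for i in range((column + 1), (column + 3)):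
--             remove_num(choices, board[row - 1][i])
--     # 2nd column
--     if (column + 2) % 3 == 0 and (row + 2) % 3 == 0:
--         for i in range((column - 1), (column + 2)):
--             if i == column:
--                 continue
--             remove_num(choices, board[row - 1][i])
--     # 3rd column
--     if (column + 1) % 3 == 0 and (row + 2) % 3 == 0:
--         for i in range((column - 2), column):
--             remove_num(choices, board[row - 1][i])
--
--     # 3rd row of blocks
--     # 1st column
--     if column % 3 == 0 and (row + 1) % 3 == 0:
--         for i in range((row - 2), row):
--             for j in range((column + 1), (column + 3)):
--                 remove_num(choices, board[i][j])
--
--     # 2nd column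
--     if (column + 2) % 3 == 0 and (row + 1) % 3 == 0:
--         for i in range((row - 2), row):
--             for j in range((column - 1), (column + 2)):
--                 if j == column:
--                     continue
--                 remove_num(choices, board[i][j])
--
--     # 3rd column
--     if (column + 1) % 3 == 0 and (row + 1) % 3 == 0:
--         for i in range((row - 2), row):
--             for j in range((column - 2), column):
--                 remove_num(choices, board[i][j])
--
--     return choices
-- ===== SOURCE B (Python) =====
-- def remove_num(choices, num):
--     try:
--         choices.remove(num)
--     except:
--         pass
--
-- def prune_choices(board, choices, row, column):
--     # along same column from top to current position
--     for i in range(0, row):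
--         remove_num(choices, board[i][column])
--
--     # along same row from right to current position
--     for i in range(0, column):
--         remove_num(choices, board[row][i])
--
--     # block cells strictly above the current row, skipping the current column
--     br = (row // 3) * 3
--     bc = (column // 3) * 3
--     for i in range(br, row):
--         for j in range(bc, bc + 3):
--             if j != column:
--                 remove_num(choices, board[i][j])
--
--     return choices
-- ===== Notes on version B (the rewrite author's own statement) =====
-- stated objective: simpler
-- what changed: The six modular-conditioned block branches (2nd/3rd block row x 1st/2nd/3rd block column) are replaced by one general scan over the block: rows from (row//3)*3 up to row, columns from (column//3)*3 for 3, skipping the current column.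
import Mathlib
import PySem

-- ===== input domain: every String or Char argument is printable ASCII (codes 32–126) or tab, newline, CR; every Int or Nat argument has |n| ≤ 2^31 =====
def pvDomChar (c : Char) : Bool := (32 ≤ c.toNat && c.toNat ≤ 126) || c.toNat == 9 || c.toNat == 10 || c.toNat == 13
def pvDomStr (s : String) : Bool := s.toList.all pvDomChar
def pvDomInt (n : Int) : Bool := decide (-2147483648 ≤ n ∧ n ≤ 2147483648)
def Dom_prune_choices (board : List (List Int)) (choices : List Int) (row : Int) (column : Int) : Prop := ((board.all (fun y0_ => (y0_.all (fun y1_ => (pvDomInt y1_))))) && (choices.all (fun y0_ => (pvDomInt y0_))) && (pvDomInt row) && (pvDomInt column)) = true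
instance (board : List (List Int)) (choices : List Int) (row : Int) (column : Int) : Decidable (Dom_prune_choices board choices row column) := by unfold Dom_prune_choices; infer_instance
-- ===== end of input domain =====

-- B replaces A's six modular-conditioned block branches with one general scan of the
-- block rows above the current cell (objective: simpler).  Both Pythons mutate the
-- `choices` argument in place; the equivalence proved here is about the RETURN value.

-- ===== PORT A =====
-- shared helper: Python's remove_num (list.remove inside a bare try/except: pass)
def remove_num (choices : List Int) (num : Int) : List Int :=
  match PySem.List.remove? choices num with
  | some l => l
  | none => choices

-- board[i][j]; the defaults are never reached under Pre_ (which excludes IndexError)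
def pvCell (board : List (List Int)) (i j : Int) : Int :=
  PySem.List.pyGetD (PySem.List.pyGetD board i []) j 0

def prune_choices (board : List (List Int)) (choices : List Int) (row : Int) (column : Int) : List Int :=
  -- along same column from top to current position
  let c := (PySem.List.pyRange 0 row).foldl (fun ch i => remove_num ch (pvCell board i column)) choices
  -- along same row from right to current position
  let c := (PySem.List.pyRange 0 column).foldl (fun ch i => remove_num ch (pvCell board row i)) c
  -- 2nd row of blocks, 1st column
  let c := if PySem.Int.mod column 3 = 0 ∧ PySem.Int.mod (row + 2) 3 = 0 then
      (PySem.List.pyRange (column + 1) (column + 3)).foldl (fun ch i => remove_num ch (pvCell board (row - 1) i)) c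
    else c
  -- 2nd row of blocks, 2nd column
  let c := if PySem.Int.mod (column + 2) 3 = 0 ∧ PySem.Int.mod (row + 2) 3 = 0 then
      (PySem.List.pyRange (column - 1) (column + 2)).foldl
        (fun ch i => if i = column then ch else remove_num ch (pvCell board (row - 1) i)) c
    else c
  -- 2nd row of blocks, 3rd column
  let c := if PySem.Int.mod (column + 1) 3 = 0 ∧ PySem.Int.mod (row + 2) 3 = 0 then
      (PySem.List.pyRange (column - 2) column).foldl (fun ch i => remove_num ch (pvCell board (row - 1) i)) c
    else c
  -- 3rd row of blocks, 1st column
  let c := if PySem.Int.mod column 3 = 0 ∧ PySem.Int.mod (row + 1) 3 = 0 then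
      (PySem.List.pyRange (row - 2) row).foldl (fun ch i =>
        (PySem.List.pyRange (column + 1) (column + 3)).foldl (fun ch j => remove_num ch (pvCell board i j)) ch) c
    else c
  -- 3rd row of blocks, 2nd column
  let c := if PySem.Int.mod (column + 2) 3 = 0 ∧ PySem.Int.mod (row + 1) 3 = 0 then
      (PySem.List.pyRange (row - 2) row).foldl (fun ch i =>
        (PySem.List.pyRange (column - 1) (column + 2)).foldl
          (fun ch j => if j = column then ch else remove_num ch (pvCell board i j)) ch) c
    else c
  -- 3rd row of blocks, 3rd column
  let c := if PySem.Int.mod (column + 1) 3 = 0 ∧ PySem.Int.mod (row + 1) 3 = 0 then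
      (PySem.List.pyRange (row - 2) row).foldl (fun ch i =>
        (PySem.List.pyRange (column - 2) column).foldl (fun ch j => remove_num ch (pvCell board i j)) ch) c
    else c
  c

-- ===== PORT B =====
def prune_choices_alt (board : List (List Int)) (choices : List Int) (row : Int) (column : Int) : List Int :=
  -- along same column from top to current position
  let c := (PySem.List.pyRange 0 row).foldl (fun ch i => remove_num ch (pvCell board i column)) choices
  -- along same row from right to current position
  let c := (PySem.List.pyRange 0 column).foldl (fun ch i => remove_num ch (pvCell board row i)) c
  -- block cells strictly above the current row, skipping the current column
  let br := PySem.Int.floordiv row 3 * 3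
  let bc := PySem.Int.floordiv column 3 * 3
  (PySem.List.pyRange br row).foldl (fun ch i =>
    (PySem.List.pyRange bc (bc + 3)).foldl
      (fun ch j => if j ≠ column then remove_num ch (pvCell board i j) else ch) ch) c

-- ===== PRECONDITION & SPEC =====
-- true iff board[i][j] would not raise IndexError (negative Python indices wrap)
def pvCellOK (board : List (List Int)) (i j : Int) : Bool :=
  match PySem.List.pyGet? board i with
  | none => false
  | some r => decide (PySem.Raise.InRange r.length j)

-- Pre_ excludes exactly the inputs on which A raises IndexError: some accessed
-- board cell (column above, row to the left, or block cell above) is out of range.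
def Pre_prune_choices (board : List (List Int)) (choices : List Int) (row : Int) (column : Int) : Prop :=
  -- accesses board[i][column] for 0 <= i < row
  (row ≤ 0 ∨ (row ≤ (board.length : Int) ∧
      ∀ r ∈ board.take row.toNat, PySem.Raise.InRange r.length column)) ∧
  -- accesses board[row][i] for 0 <= i < column
  (column ≤ 0 ∨ (PySem.Raise.InRange board.length row ∧
      column ≤ ((PySem.List.pyGetD board row []).length : Int))) ∧
  -- accesses board[i][j] for the at most 2×3 block cells above, skipping j = column
  (∀ i ∈ PySem.List.pyRange (PySem.Int.floordiv row 3 * 3) row,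
    ∀ j ∈ PySem.List.pyRange (PySem.Int.floordiv column 3 * 3) (PySem.Int.floordiv column 3 * 3 + 3),
      j ≠ column → pvCellOK board i j = true)
instance (board : List (List Int)) (choices : List Int) (row : Int) (column : Int) : Decidable (Pre_prune_choices board choices row column) := by unfold Pre_prune_choices; infer_instance

def pvWitness_prune_choices : List (List Int) × List Int × Int × Int :=
  ([[1, 2, 3], [4, 5, 6], [7, 8, 9]], [1, 2, 3, 4], 1, 1)

def Spec_prune_choices (board : List (List Int)) (choices : List Int) (row : Int) (column : Int) (out : List Int) : Prop := out = prune_choices_alt board choices row column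
instance (board : List (List Int)) (choices : List Int) (row : Int) (column : Int) (out : List Int) : Decidable (Spec_prune_choices board choices row column out) := by unfold Spec_prune_choices; infer_instance

-- ===== CLAIM (what is proved, stated in full; the proofs are below) =====
def Claim_equal_prune_choices : Prop := ∀ (board : List (List Int)) (choices : List Int) (row : Int) (column : Int), Dom_prune_choices board choices row column → Pre_prune_choices board choices row column → Spec_prune_choices board choices row column (prune_choices board choices row column)

-- ===== LEMMAS AND PROOFS =====

-- B's guarded inner scan over the block columns equals A's branch, per residue of column mod 3
theorem inner_col0 (f : List Int → Int → List Int) (column : Int) (h : column % 3 = 0) (ch : List Int) :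
    (PySem.List.pyRange (column / 3 * 3) (column / 3 * 3 + 3)).foldl
      (fun ch j => if j ≠ column then f ch j else ch) ch
    = (PySem.List.pyRange (column + 1) (column + 3)).foldl f ch := by
  have hb : column / 3 * 3 = column := by omega
  rw [hb, PySem.List.pyRange_one_cons (by omega)]
  simp only [List.foldl_cons, ne_eq, ite_not]
  refine PySem.List.foldl_congr_mem _ _ _ _ ?_
  intro acc x hx
  rw [PySem.List.mem_pyRange_one] at hx
  rw [if_neg (by omega)]

theorem inner_col1 (f : List Int → Int → List Int) (column : Int) (h : column % 3 = 1) (ch : List Int) :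
    (PySem.List.pyRange (column / 3 * 3) (column / 3 * 3 + 3)).foldl
      (fun ch j => if j ≠ column then f ch j else ch) ch
    = (PySem.List.pyRange (column - 1) (column + 2)).foldl
        (fun ch j => if j = column then ch else f ch j) ch := by
  have hb : column / 3 * 3 = column - 1 := by omega
  have hb3 : column - 1 + 3 = column + 2 := by ring
  rw [hb, hb3]
  refine PySem.List.foldl_congr_mem _ _ _ _ ?_
  intro acc x _
  by_cases hx : x = column <;> simp [hx]

theorem inner_col2 (f : List Int → Int → List Int) (column : Int) (h : column % 3 = 2) (ch : List Int) :
    (PySem.List.pyRange (column / 3 * 3) (column / 3 * 3 + 3)).foldl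
      (fun ch j => if j ≠ column then f ch j else ch) ch
    = (PySem.List.pyRange (column - 2) column).foldl f ch := by
  have hb : column / 3 * 3 = column - 2 := by omega
  have hb3 : column - 2 + 3 = column + 1 := by ring
  rw [hb, hb3, show column + 1 = column + 1 from rfl,
      PySem.List.pyRange_one_succ_right (by omega)]
  rw [List.foldl_append]
  simp only [List.foldl_cons, List.foldl_nil, ne_eq, not_true_eq_false, if_false]
  refine PySem.List.foldl_congr_mem _ _ _ _ ?_
  intro acc x hx
  rw [PySem.List.mem_pyRange_one] at hx
  rw [if_pos (by omega)]

theorem pyRange_pred_self (r : Int) : PySem.List.pyRange (r - 1) r = [r - 1] := by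
  have h := PySem.List.pyRange_one_singleton (r - 1)
  rwa [sub_add_cancel] at h

theorem prune_choices_spec : Claim_equal_prune_choices := by
  intro board choices row column _ _
  unfold Spec_prune_choices prune_choices prune_choices_alt
  simp only [PySem.Int.mod_eq_emod_of_pos (by norm_num : (0:Int) < 3),
             PySem.Int.floordiv_eq_ediv_of_pos (by norm_num : (0:Int) < 3)]
  generalize (PySem.List.pyRange 0 column).foldl _
    ((PySem.List.pyRange 0 row).foldl _ choices) = c
  have hrow : row % 3 = 0 ∨ row % 3 = 1 ∨ row % 3 = 2 := by omega
  have hcol : column % 3 = 0 ∨ column % 3 = 1 ∨ column % 3 = 2 := by omega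
  rcases hrow with hr | hr | hr
  · -- no block rows above: every branch of A is off and B's outer range is empty
    have n1 : ¬ (column % 3 = 0 ∧ (row + 2) % 3 = 0) := by omega
    have n2 : ¬ ((column + 2) % 3 = 0 ∧ (row + 2) % 3 = 0) := by omega
    have n3 : ¬ ((column + 1) % 3 = 0 ∧ (row + 2) % 3 = 0) := by omega
    have n4 : ¬ (column % 3 = 0 ∧ (row + 1) % 3 = 0) := by omega
    have n5 : ¬ ((column + 2) % 3 = 0 ∧ (row + 1) % 3 = 0) := by omega
    have n6 : ¬ ((column + 1) % 3 = 0 ∧ (row + 1) % 3 = 0) := by omega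
    have hnil : PySem.List.pyRange (row / 3 * 3) row = ([] : List Int) :=
      PySem.List.pyRange_one_eq_nil (by omega)
    rw [if_neg n1, if_neg n2, if_neg n3, if_neg n4, if_neg n5, if_neg n6, hnil, List.foldl_nil]
  · -- one block row above (row-1); B's outer range is the singleton [row-1]
    have hbr : row / 3 * 3 = row - 1 := by omega
    have n4 : ¬ (column % 3 = 0 ∧ (row + 1) % 3 = 0) := by omega
    have n5 : ¬ ((column + 2) % 3 = 0 ∧ (row + 1) % 3 = 0) := by omega
    have n6 : ¬ ((column + 1) % 3 = 0 ∧ (row + 1) % 3 = 0) := by omega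
    rw [hbr, pyRange_pred_self, if_neg n4, if_neg n5, if_neg n6]
    simp only [List.foldl_cons, List.foldl_nil]
    rcases hcol with hc | hc | hc
    · have n2 : ¬ ((column + 2) % 3 = 0 ∧ (row + 2) % 3 = 0) := by omega
      have n3 : ¬ ((column + 1) % 3 = 0 ∧ (row + 2) % 3 = 0) := by omega
      rw [if_neg n2, if_neg n3, if_pos (by omega : column % 3 = 0 ∧ (row + 2) % 3 = 0)]
      exact (inner_col0 _ _ hc c).symm
    · have n1 : ¬ (column % 3 = 0 ∧ (row + 2) % 3 = 0) := by omega
      have n3 : ¬ ((column + 1) % 3 = 0 ∧ (row + 2) % 3 = 0) := by omega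
      rw [if_neg n1, if_neg n3, if_pos (by omega : (column + 2) % 3 = 0 ∧ (row + 2) % 3 = 0)]
      exact (inner_col1 _ _ hc c).symm
    · have n1 : ¬ (column % 3 = 0 ∧ (row + 2) % 3 = 0) := by omega
      have n2 : ¬ ((column + 2) % 3 = 0 ∧ (row + 2) % 3 = 0) := by omega
      rw [if_neg n1, if_neg n2, if_pos (by omega : (column + 1) % 3 = 0 ∧ (row + 2) % 3 = 0)]
      exact (inner_col2 _ _ hc c).symm
  · -- two block rows above; B's outer range is pyRange (row-2) row, as in A
    have hbr : row / 3 * 3 = row - 2 := by omega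
    have n1 : ¬ (column % 3 = 0 ∧ (row + 2) % 3 = 0) := by omega
    have n2 : ¬ ((column + 2) % 3 = 0 ∧ (row + 2) % 3 = 0) := by omega
    have n3 : ¬ ((column + 1) % 3 = 0 ∧ (row + 2) % 3 = 0) := by omega
    rw [hbr, if_neg n1, if_neg n2, if_neg n3]
    rcases hcol with hc | hc | hc
    · have n5 : ¬ ((column + 2) % 3 = 0 ∧ (row + 1) % 3 = 0) := by omega
      have n6 : ¬ ((column + 1) % 3 = 0 ∧ (row + 1) % 3 = 0) := by omega
      rw [if_neg n5, if_neg n6, if_pos (by omega : column % 3 = 0 ∧ (row + 1) % 3 = 0)]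
      exact PySem.List.foldl_congr_mem _ _ _ _ (fun acc x _ => (inner_col0 _ _ hc acc).symm)
    · have n4 : ¬ (column % 3 = 0 ∧ (row + 1) % 3 = 0) := by omega
      have n6 : ¬ ((column + 1) % 3 = 0 ∧ (row + 1) % 3 = 0) := by omega
      rw [if_neg n4, if_neg n6, if_pos (by omega : (column + 2) % 3 = 0 ∧ (row + 1) % 3 = 0)]
      exact PySem.List.foldl_congr_mem _ _ _ _ (fun acc x _ => (inner_col1 _ _ hc acc).symm)
    · have n4 : ¬ (column % 3 = 0 ∧ (row + 1) % 3 = 0) := by omega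
      have n5 : ¬ ((column + 2) % 3 = 0 ∧ (row + 1) % 3 = 0) := by omega
      rw [if_neg n4, if_neg n5, if_pos (by omega : (column + 1) % 3 = 0 ∧ (row + 1) % 3 = 0)]
      exact PySem.List.foldl_congr_mem _ _ _ _ (fun acc x _ => (inner_col2 _ _ hc acc).symm)
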